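-- pv_equiv track=rewrite | github.com/cagatay-softgineer/Efficiency-Analyzer | MergeCSVs.py | turn_true_if_false_on_both_sides_with_threshold
-- ===== SOURCE A (Python) =====
-- def turn_true_if_false_on_both_sides_with_threshold(arr, threshold=1):
--     result = arr.copy()
--
--     for i in range(len(arr)):
--         if arr[i]:
--             left_side_has_true = any(arr[max(0, max(0,i-1) - threshold-1):max(0,i-1)])
--             right_side_has_true = any(arr[i+1:i + threshold + 1])
--
--             if not left_side_has_true and not right_side_has_true:
--                 result[i] = False
--
--     return result
-- ===== SOURCE B (Python) =====
-- def turn_true_if_false_on_both_sides_with_threshold(arr, threshold=1):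
--     n = len(arr)
--     # prefix counts of True values: pre[k] = number of True in arr[:k]
--     pre = [0] * (n + 1)
--     for i, v in enumerate(arr):
--         pre[i + 1] = pre[i] + (1 if v else 0)
--
--     def window_has_true(lo, hi):
--         lo = min(max(lo, 0), n)
--         hi = min(max(hi, 0), n)
--         return pre[hi] - pre[lo] > 0
--
--     return [
--         v and (window_has_true(max(0, i - 1) - threshold - 1, max(0, i - 1))
--                or window_has_true(i + 1, i + threshold + 1))
--         for i, v in enumerate(arr)
--     ]
-- ===== Notes on version B (the rewrite author's own statement) =====
-- stated objective: faster
-- what changed: B replaces A's per-index window slices (any() over a fresh slice for every True cell) by a prefix-count array of the booleans built once, answering each window-has-True query in O(1), and builds the result as a single comprehension instead of mutating a copy.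
-- intended difference: When threshold is negative enough that the right window's stop index i+threshold+1 goes negative, A's slice arr[i+1:i+threshold+1] wraps around to the end of the list and may find a True there, so A keeps such an isolated True; B treats any empty/negative window as containing no True and clears the cell, which is the intended 'no True within threshold' semantics. — e.g. on turn_true_if_false_on_both_sides_with_threshold([true, true, false], -2): A returns [true, false, false], B returns [false, false, false]
import Mathlib
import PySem

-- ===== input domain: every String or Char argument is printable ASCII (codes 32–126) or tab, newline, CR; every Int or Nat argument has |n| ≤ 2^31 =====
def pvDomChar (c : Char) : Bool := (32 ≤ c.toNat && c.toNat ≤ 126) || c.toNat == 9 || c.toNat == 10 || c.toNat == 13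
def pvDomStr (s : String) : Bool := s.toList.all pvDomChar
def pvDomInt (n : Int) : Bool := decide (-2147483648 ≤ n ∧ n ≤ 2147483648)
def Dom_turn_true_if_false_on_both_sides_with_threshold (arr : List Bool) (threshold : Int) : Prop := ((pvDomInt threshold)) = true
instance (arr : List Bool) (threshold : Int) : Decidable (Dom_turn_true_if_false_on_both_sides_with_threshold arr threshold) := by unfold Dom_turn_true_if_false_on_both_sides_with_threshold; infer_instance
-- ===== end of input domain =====

-- B replaces A's per-True-cell window slices by a prefix-count array answering each
-- window-has-True query in O(1) (objective: faster, O(n·threshold) → O(n)).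

-- ===== PORT A =====
-- literal port of A: copy the array, loop i over range(len(arr)), slice out both windows,
-- clear result[i] when neither window contains a True.
def turn_true_if_false_on_both_sides_with_threshold (arr : List Bool) (threshold : Int) : List Bool :=
  (List.range arr.length).foldl (fun result i =>
    if arr.getD i false then
      let left_side_has_true :=
        (PySem.List.slice arr (some (max 0 (max 0 ((i : Int) - 1) - threshold - 1)))
                              (some (max 0 ((i : Int) - 1)))).any (fun x => x)
      let right_side_has_true :=
        (PySem.List.slice arr (some ((i : Int) + 1)) (some ((i : Int) + threshold + 1))).any (fun x => x)
      if !left_side_has_true && !right_side_has_true then result.set i false else result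
    else result) arr

-- ===== PORT B =====
-- pre[k] = number of True values in arr[:k]  (Source B's prefix-count loop)
def bPrefix (arr : List Bool) : List Int :=
  (arr.foldl (fun (ps : List Int × Int) v =>
      let s := ps.2 + (if v then 1 else 0); (ps.1 ++ [s], s)) ([0], 0)).1

-- Source B's window_has_true: clamp both bounds into [0,n], compare prefix counts
def bWindowHasTrue (pre : List Int) (n : Int) (lo hi : Int) : Bool :=
  let lo := min (max lo 0) n
  let hi := min (max hi 0) n
  decide (pre.getD hi.toNat 0 - pre.getD lo.toNat 0 > 0)

def turn_true_if_false_on_both_sides_with_threshold_alt (arr : List Bool) (threshold : Int) : List Bool :=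
  let n : Int := arr.length
  let pre := bPrefix arr
  (PySem.List.enumerate arr).map (fun p =>
    p.2 && (bWindowHasTrue pre n (max 0 (p.1 - 1) - threshold - 1) (max 0 (p.1 - 1)) ||
            bWindowHasTrue pre n (p.1 + 1) (p.1 + threshold + 1)))

-- ===== PRECONDITION & SPEC =====
-- When threshold is negative enough that the right window's stop i+threshold+1 is negative,
-- A's slice arr[i+1:i+threshold+1] wraps to the end of the list and may find a True there, so A
-- keeps such an isolated True; B treats an empty/negative window as having no True and clears the
-- cell, the intended 'no True within threshold' semantics.
def D_turn_true_if_false_on_both_sides_with_threshold (arr : List Bool) (threshold : Int) : Prop :=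
  ∃ i ∈ Finset.range arr.length, arr.getD i false = true ∧ (i : Int) + threshold + 1 < 0 ∧
    true ∈ (arr.drop (i + 1)).take (((arr.length : Int) + threshold).toNat)
instance (arr : List Bool) (threshold : Int) : Decidable (D_turn_true_if_false_on_both_sides_with_threshold arr threshold) := by
  unfold D_turn_true_if_false_on_both_sides_with_threshold; infer_instance

def Spec_turn_true_if_false_on_both_sides_with_threshold (arr : List Bool) (threshold : Int) (out : List Bool) : Prop :=
  ¬ D_turn_true_if_false_on_both_sides_with_threshold arr threshold → out = turn_true_if_false_on_both_sides_with_threshold_alt arr threshold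
instance (arr : List Bool) (threshold : Int) (out : List Bool) : Decidable (Spec_turn_true_if_false_on_both_sides_with_threshold arr threshold out) := by
  unfold Spec_turn_true_if_false_on_both_sides_with_threshold; infer_instance

def pvDiffWitness_turn_true_if_false_on_both_sides_with_threshold : List Bool × Int := ([true, true, false], -2)
def pvDiffWitnessOut_turn_true_if_false_on_both_sides_with_threshold : (List Bool) × (List Bool) :=
  ([true, false, false], [false, false, false])

-- ===== CLAIM (what is proved, stated in full; the proofs are below) =====
def Claim_unchanged_turn_true_if_false_on_both_sides_with_threshold : Prop := ∀ (arr : List Bool) (threshold : Int), Dom_turn_true_if_false_on_both_sides_with_threshold arr threshold → Spec_turn_true_if_false_on_both_sides_with_threshold arr threshold (turn_true_if_false_on_both_sides_with_threshold arr threshold)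
def Claim_changed_turn_true_if_false_on_both_sides_with_threshold : Prop := Dom_turn_true_if_false_on_both_sides_with_threshold (pvDiffWitness_turn_true_if_false_on_both_sides_with_threshold.1) (pvDiffWitness_turn_true_if_false_on_both_sides_with_threshold.2) ∧ D_turn_true_if_false_on_both_sides_with_threshold (pvDiffWitness_turn_true_if_false_on_both_sides_with_threshold.1) (pvDiffWitness_turn_true_if_false_on_both_sides_with_threshold.2) ∧ turn_true_if_false_on_both_sides_with_threshold (pvDiffWitness_turn_true_if_false_on_both_sides_with_threshold.1) (pvDiffWitness_turn_true_if_false_on_both_sides_with_threshold.2) = pvDiffWitnessOut_turn_true_if_false_on_both_sides_with_threshold.1 ∧ turn_true_if_false_on_both_sides_with_threshold_alt (pvDiffWitness_turn_true_if_false_on_both_sides_with_threshold.1) (pvDiffWitness_turn_true_if_false_on_both_sides_with_threshold.2) = pvDiffWitnessOut_turn_true_if_false_on_both_sides_with_threshold.2 ∧ pvDiffWitnessOut_turn_true_if_false_on_both_sides_with_threshold.1 ≠ pvDiffWitnessOut_turn_true_if_false_on_both_sides_with_threshold.2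
def Claim_exact_turn_true_if_false_on_both_sides_with_threshold : Prop := ∀ (arr : List Bool) (threshold : Int), Dom_turn_true_if_false_on_both_sides_with_threshold arr threshold → D_turn_true_if_false_on_both_sides_with_threshold arr threshold → turn_true_if_false_on_both_sides_with_threshold arr threshold ≠ turn_true_if_false_on_both_sides_with_threshold_alt arr threshold

-- ===== LEMMAS AND PROOFS =====

-- number of True values, as an Int
def cnt (l : List Bool) : Int := (l.countP (fun b => b) : Int)

lemma cnt_take_mono (l : List Bool) {a b : Nat} (h : a ≤ b) : cnt (l.take a) ≤ cnt (l.take b) := by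
  have hp : (l.take a) <+: (l.take b) := List.take_isPrefix_take.mpr (Or.inl h)
  exact Int.ofNat_le.mpr (hp.sublist.countP_le (p := fun b => b))

lemma cnt_take_min (l : List Bool) (k : Nat) : cnt (l.take (min k l.length)) = cnt (l.take k) := by
  rcases le_total k l.length with h | h
  · rw [min_eq_left h]
  · rw [min_eq_right h, List.take_of_length_le h, List.take_length]

-- any() over a window [a, b) = positive difference of prefix counts
lemma anySeg_eq (l : List Bool) (a b : Nat) :
    ((l.drop a).take (b - a)).any (fun x => x) = decide (cnt (l.take b) - cnt (l.take a) > 0) := by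
  rcases le_total a b with h | h
  · have htake : l.take b = l.take a ++ (l.drop a).take (b - a) := by
      have hb : b = a + (b - a) := by omega
      conv_lhs => rw [hb]
      exact List.take_add
    have hcnt : cnt (l.take b) = cnt (l.take a) + cnt ((l.drop a).take (b - a)) := by
      rw [htake]; simp [cnt, List.countP_append]
    rw [hcnt]
    rcases hany : ((l.drop a).take (b - a)).any (fun x => x) with _ | _
    · have h0 : cnt ((l.drop a).take (b-a)) = 0 := by
        simp only [cnt, Int.natCast_eq_zero, List.countP_eq_zero]
        intro x hx
        simpa using List.any_eq_false.mp hany x hx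
      simp [h0]
    · obtain ⟨x, hx, hpx⟩ := List.any_eq_true.mp hany
      have h1 : 0 < ((l.drop a).take (b-a)).countP (fun b => b) :=
        List.countP_pos_iff.mpr ⟨x, hx, hpx⟩
      have h2 : (0:Int) < cnt ((l.drop a).take (b-a)) := by unfold cnt; exact_mod_cast h1
      simp; omega
  · have h0 : b - a = 0 := by omega
    have := cnt_take_mono l h
    simp [h0]; omega

lemma cnt_cons (v : Bool) (l : List Bool) : cnt (v :: l) = (if v then 1 else 0) + cnt l := by
  cases v <;> simp [cnt, List.countP_cons] <;> omega

lemma bPrefix_invar (l : List Bool) : ∀ (p : List Int) (s : Int),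
    l.foldl (fun (ps : List Int × Int) v =>
      let s := ps.2 + (if v then 1 else 0); (ps.1 ++ [s], s)) (p, s)
    = (p ++ (List.range l.length).map (fun k => s + cnt (l.take (k+1))), s + cnt l) := by
  induction l with
  | nil => intro p s; simp [cnt]
  | cons v tl ih =>
    intro p s
    simp only [List.foldl_cons]
    rw [ih]
    rw [Prod.mk.injEq]
    constructor
    · simp only [List.length_cons, List.range_succ_eq_map, List.map_cons, List.map_map,
        List.append_assoc, List.singleton_append]
      congr 1
      congr 1
      · simp [cnt_cons, cnt]
      · apply List.map_congr_left
        intro k _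
        simp only [Function.comp_apply, List.take_succ_cons, cnt_cons]
        ring
    · rw [cnt_cons]; ring

-- bPrefix really is the prefix-count list
lemma bPrefix_getD (arr : List Bool) (k : Nat) (hk : k ≤ arr.length) :
    (bPrefix arr).getD k 0 = cnt (arr.take k) := by
  unfold bPrefix
  rw [bPrefix_invar]
  cases k with
  | zero => simp [cnt]
  | succ j =>
    have hj : j < arr.length := by omega
    simp only [List.getD, List.getElem?_append_right (by simp : ([0]:List Int).length ≤ j+1)]
    simp [List.getElem?_map, List.getElem?_range hj]

-- window equivalence, both raw bounds nonnegative (left window always; right when stop ≥ 0)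
lemma window_eq (arr : List Bool) (lo hi : Int) (hlo : 0 ≤ lo) (hhi : 0 ≤ hi) :
    (PySem.List.slice arr (some lo) (some hi)).any (fun x => x) =
      bWindowHasTrue (bPrefix arr) arr.length lo hi := by
  rw [PySem.List.slice_toNat arr hlo hhi]
  rw [anySeg_eq]
  unfold bWindowHasTrue
  have e1 : (min (max lo 0) (arr.length : Int)).toNat = min lo.toNat arr.length := by omega
  have e2 : (min (max hi 0) (arr.length : Int)).toNat = min hi.toNat arr.length := by omega
  simp only [e1, e2]
  rw [bPrefix_getD _ _ (by omega), bPrefix_getD _ _ (by omega)]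
  rw [cnt_take_min, cnt_take_min]

-- A's right window with a negative stop index: the wrapped slice
lemma right_slice_neg (arr : List Bool) (threshold : Int) (j : Nat) (hj : j < arr.length)
    (hneg : (j : Int) + threshold + 1 < 0) :
    PySem.List.slice arr (some ((j : Int) + 1)) (some ((j : Int) + threshold + 1)) =
      (arr.drop (j + 1)).take (((arr.length : Int) + threshold).toNat) := by
  simp only [PySem.List.slice, PySem.List.clampIdx]
  have h1 : ¬ ((j : Int) + 1 < 0) := by omega
  simp only [if_neg h1, if_pos hneg]
  have e1 : min ((j : Int) + 1).toNat arr.length = j + 1 := by omega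
  rw [e1]
  split
  · next h =>
    have : ((arr.length : Int) + threshold).toNat = 0 := by omega
    simp [this]
  · next h =>
    congr 1
    omega

-- B's right window with a negative stop index is empty
lemma bRight_neg (arr : List Bool) (threshold : Int) (j : Nat)
    (hneg : (j : Int) + threshold + 1 < 0) :
    bWindowHasTrue (bPrefix arr) arr.length ((j : Int) + 1) ((j : Int) + threshold + 1) = false := by
  unfold bWindowHasTrue
  have e2 : (min (max ((j : Int) + threshold + 1) 0) (arr.length : Int)).toNat = 0 := by omega
  have e1 : (min (max ((j : Int) + 1) 0) (arr.length : Int)).toNat = min (j + 1) arr.length := by omega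
  simp only [e1, e2]
  rw [bPrefix_getD _ _ (by omega), bPrefix_getD _ _ (by omega)]
  have h0 : cnt (arr.take 0) = 0 := by simp [cnt]
  have := cnt_take_mono arr (Nat.zero_le (min (j+1) arr.length))
  simp only [h0] at this ⊢
  simp; omega

-- B's left window is empty whenever the right stop is negative (then lo ≥ hi)
lemma bLeft_neg (arr : List Bool) (threshold : Int) (j : Nat)
    (hneg : (j : Int) + threshold + 1 < 0) :
    bWindowHasTrue (bPrefix arr) arr.length (max 0 ((j : Int) - 1) - threshold - 1) (max 0 ((j : Int) - 1)) = false := by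
  set L := max 0 ((j : Int) - 1) - threshold - 1 with hL
  set R := max 0 ((j : Int) - 1) with hR
  rw [show bWindowHasTrue (bPrefix arr) arr.length L R =
      decide ((bPrefix arr).getD (min (max R 0) (arr.length:Int)).toNat 0 -
        (bPrefix arr).getD (min (max L 0) (arr.length:Int)).toNat 0 > 0) from rfl]
  have e : (min (max R 0) (arr.length:Int)).toNat ≤ (min (max L 0) (arr.length:Int)).toNat := by omega
  rw [bPrefix_getD _ _ (by omega), bPrefix_getD _ _ (by omega)]
  have := cnt_take_mono arr e
  simp; omega

-- the per-index clear condition of A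
def cA (arr : List Bool) (threshold : Int) (i : Nat) : Bool :=
  arr.getD i false &&
  !((PySem.List.slice arr (some (max 0 (max 0 ((i : Int) - 1) - threshold - 1)))
                          (some (max 0 ((i : Int) - 1)))).any (fun x => x)) &&
  !((PySem.List.slice arr (some ((i : Int) + 1)) (some ((i : Int) + threshold + 1))).any (fun x => x))

lemma foldl_set_len (c : Nat → Bool) (res : List Bool) (m : Nat) :
    ((List.range m).foldl (fun r i => if c i then r.set i false else r) res).length = res.length := by
  induction m generalizing res with
  | zero => rfl
  | succ k ih =>
    rw [List.range_succ, List.foldl_append]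
    simp only [List.foldl_cons, List.foldl_nil]
    split
    · rw [List.length_set, ih]
    · rw [ih]

lemma foldl_set_getElem? (c : Nat → Bool) (res : List Bool) (m j : Nat) (hj : j < res.length) :
    ((List.range m).foldl (fun r i => if c i then r.set i false else r) res)[j]?
      = some (if j < m ∧ c j then false else res[j]) := by
  induction m with
  | zero => simp [List.getElem?_eq_getElem hj]
  | succ k ih =>
    rw [List.range_succ, List.foldl_append]
    simp only [List.foldl_cons, List.foldl_nil]
    by_cases hck : c k
    · rw [if_pos hck, List.getElem?_set]
      by_cases hjk : k = j
      · subst hjk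
        rw [if_pos rfl, if_pos (by rw [foldl_set_len]; exact hj)]
        simp [hck]
      · rw [if_neg hjk, ih]
        congr 1
        have : (j < k ∧ c j = true) ↔ (j < k + 1 ∧ c j = true) := by
          constructor
          · rintro ⟨h1, h2⟩; exact ⟨by omega, h2⟩
          · rintro ⟨h1, h2⟩; refine ⟨by omega, h2⟩
        simp only [this]
    · rw [if_neg hck, ih]
      congr 1
      have : (j < k ∧ c j = true) ↔ (j < k + 1 ∧ c j = true) := by
        constructor
        · rintro ⟨h1, h2⟩; exact ⟨by omega, h2⟩
        · rintro ⟨h1, h2⟩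
          refine ⟨?_, h2⟩
          rcases Nat.lt_succ_iff_lt_or_eq.mp h1 with h | h
          · exact h
          · subst h; rw [h2] at hck; exact absurd rfl hck
      simp only [this]

lemma portA_eq_foldl (arr : List Bool) (threshold : Int) :
    turn_true_if_false_on_both_sides_with_threshold arr threshold =
      (List.range arr.length).foldl (fun r i => if cA arr threshold i then r.set i false else r) arr := by
  unfold turn_true_if_false_on_both_sides_with_threshold
  congr 1
  funext r i
  simp only [cA]
  by_cases h1 : arr.getD i false <;>
    by_cases h2 : (PySem.List.slice arr (some (max 0 (max 0 ((i : Int) - 1) - threshold - 1)))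
        (some (max 0 ((i : Int) - 1)))).any (fun x => x) <;>
      by_cases h3 : (PySem.List.slice arr (some ((i : Int) + 1)) (some ((i : Int) + threshold + 1))).any (fun x => x) <;>
    simp [h1, h2, h3]

lemma portA_getElem? (arr : List Bool) (threshold : Int) (j : Nat) (hj : j < arr.length) :
    (turn_true_if_false_on_both_sides_with_threshold arr threshold)[j]?
      = some (if cA arr threshold j then false else arr[j]) := by
  rw [portA_eq_foldl, foldl_set_getElem? _ _ _ _ hj]
  congr 1
  simp [hj]

lemma portA_length (arr : List Bool) (threshold : Int) :
    (turn_true_if_false_on_both_sides_with_threshold arr threshold).length = arr.length := by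
  rw [portA_eq_foldl, foldl_set_len]

lemma enum_map_getElem? {α β : Type} (f : Int × α → β) (l : List α) (s : Int) (j : Nat) (hj : j < l.length) :
    ((PySem.List.enumerate l s).map f)[j]? = some (f (s + j, l[j])) := by
  induction l generalizing s j with
  | nil => simp at hj
  | cons x xs ih =>
    rw [PySem.List.enumerate_cons]
    cases j with
    | zero => simp
    | succ i =>
      simp only [List.map_cons, List.getElem?_cons_succ, List.getElem_cons_succ]
      rw [ih _ _ (by simpa using hj)]
      congr 2
      push_cast
      ring

lemma portB_length (arr : List Bool) (threshold : Int) :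
    (turn_true_if_false_on_both_sides_with_threshold_alt arr threshold).length = arr.length := by
  unfold turn_true_if_false_on_both_sides_with_threshold_alt
  simp [PySem.List.length_enumerate]

lemma portB_getElem? (arr : List Bool) (threshold : Int) (j : Nat) (hj : j < arr.length) :
    (turn_true_if_false_on_both_sides_with_threshold_alt arr threshold)[j]?
      = some (arr[j] && (bWindowHasTrue (bPrefix arr) arr.length (max 0 ((j:Int) - 1) - threshold - 1) (max 0 ((j:Int) - 1)) ||
          bWindowHasTrue (bPrefix arr) arr.length ((j:Int) + 1) ((j:Int) + threshold + 1))) := by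
  unfold turn_true_if_false_on_both_sides_with_threshold_alt
  rw [enum_map_getElem? _ _ _ _ hj]
  norm_num

-- pointwise agreement outside D_
lemma pointwise (arr : List Bool) (threshold : Int)
    (hnD : ¬ D_turn_true_if_false_on_both_sides_with_threshold arr threshold)
    (j : Nat) (hj : j < arr.length) :
    (if cA arr threshold j then false else arr[j]) =
      (arr[j] && (bWindowHasTrue (bPrefix arr) arr.length (max 0 ((j:Int) - 1) - threshold - 1) (max 0 ((j:Int) - 1)) ||
          bWindowHasTrue (bPrefix arr) arr.length ((j:Int) + 1) ((j:Int) + threshold + 1))) := by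
  have hgetD : arr.getD j false = arr[j] := List.getD_eq_getElem arr false hj
  have hleft : (PySem.List.slice arr (some (max 0 (max 0 ((j : Int) - 1) - threshold - 1)))
        (some (max 0 ((j : Int) - 1)))).any (fun x => x)
      = bWindowHasTrue (bPrefix arr) arr.length (max 0 ((j:Int) - 1) - threshold - 1) (max 0 ((j:Int) - 1)) := by
    rw [window_eq arr _ _ (le_max_left 0 _) (le_max_left 0 _)]
    have hm : max (max 0 (max 0 ((j:Int) - 1) - threshold - 1)) 0 = max (max 0 ((j:Int) - 1) - threshold - 1) 0 := by omega
    rw [show bWindowHasTrue (bPrefix arr) arr.length (max 0 (max 0 ((j:Int) - 1) - threshold - 1)) (max 0 ((j:Int) - 1)) =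
        decide ((bPrefix arr).getD (min (max (max 0 ((j:Int) - 1)) 0) (arr.length:Int)).toNat 0 -
          (bPrefix arr).getD (min (max (max 0 (max 0 ((j:Int) - 1) - threshold - 1)) 0) (arr.length:Int)).toNat 0 > 0) from rfl,
      show bWindowHasTrue (bPrefix arr) arr.length (max 0 ((j:Int) - 1) - threshold - 1) (max 0 ((j:Int) - 1)) =
        decide ((bPrefix arr).getD (min (max (max 0 ((j:Int) - 1)) 0) (arr.length:Int)).toNat 0 -
          (bPrefix arr).getD (min (max (max 0 ((j:Int) - 1) - threshold - 1) 0) (arr.length:Int)).toNat 0 > 0) from rfl,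
      hm]
  by_cases hv : arr[j] = true
  · have hright : (PySem.List.slice arr (some ((j : Int) + 1)) (some ((j : Int) + threshold + 1))).any (fun x => x)
        = bWindowHasTrue (bPrefix arr) arr.length ((j:Int) + 1) ((j:Int) + threshold + 1) := by
      by_cases hhi : 0 ≤ (j : Int) + threshold + 1
      · exact window_eq arr _ _ (by omega) hhi
      · rw [bRight_neg arr threshold j (by omega)]
        rw [right_slice_neg arr threshold j hj (by omega)]
        rw [List.any_eq_false]
        intro x hx
        cases x
        · simp
        · exfalso
          exact hnD ⟨j, Finset.mem_range.mpr hj, by rw [hgetD, hv], by omega, hx⟩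
    simp only [cA, hgetD, hv, hleft, hright]
    cases hb1 : bWindowHasTrue (bPrefix arr) arr.length (max 0 ((j:Int) - 1) - threshold - 1) (max 0 ((j:Int) - 1)) <;>
      cases hb2 : bWindowHasTrue (bPrefix arr) arr.length ((j:Int) + 1) ((j:Int) + threshold + 1) <;> simp
  · have hv' : arr[j] = false := by simpa using hv
    simp only [cA, hgetD, hv']
    simp

-- ===== VERDICT (by name: the statement is the Claim_ definition above) =====
theorem turn_true_if_false_on_both_sides_with_threshold_spec : Claim_unchanged_turn_true_if_false_on_both_sides_with_threshold := by
  intro arr threshold _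
  unfold Spec_turn_true_if_false_on_both_sides_with_threshold
  intro hnD
  apply List.ext_getElem?
  intro j
  by_cases hj : j < arr.length
  · rw [portA_getElem? arr threshold j hj, portB_getElem? arr threshold j hj, pointwise arr threshold hnD j hj]
  · rw [List.getElem?_eq_none (by rw [portA_length]; omega),
        List.getElem?_eq_none (by rw [portB_length]; omega)]

theorem turn_true_if_false_on_both_sides_with_threshold_changed : Claim_changed_turn_true_if_false_on_both_sides_with_threshold := by
  unfold Claim_changed_turn_true_if_false_on_both_sides_with_threshold; decide

theorem turn_true_if_false_on_both_sides_with_threshold_tight : Claim_exact_turn_true_if_false_on_both_sides_with_threshold := by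
  intro arr threshold _ hD heq
  obtain ⟨i, hiR, hv, hneg, hmem⟩ := hD
  have hi : i < arr.length := Finset.mem_range.mp hiR
  have hvi : arr[i] = true := by rwa [List.getD_eq_getElem arr false hi] at hv
  have hA : (turn_true_if_false_on_both_sides_with_threshold arr threshold)[i]? = some true := by
    rw [portA_getElem? arr threshold i hi]
    have hrA : (PySem.List.slice arr (some ((i : Int) + 1)) (some ((i : Int) + threshold + 1))).any (fun x => x) = true := by
      rw [right_slice_neg arr threshold i hi hneg]
      exact List.any_eq_true.mpr ⟨true, hmem, rfl⟩
    simp [cA, hrA, hvi]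
  have hB : (turn_true_if_false_on_both_sides_with_threshold_alt arr threshold)[i]? = some false := by
    rw [portB_getElem? arr threshold i hi, bLeft_neg arr threshold i hneg, bRight_neg arr threshold i hneg]
    simp
  rw [heq, hB] at hA
  simp at hA
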